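-- pv_equiv track=rewrite | github.com/Dave-Meloncelli/RPG-Reliquary-UI-Interface | captured_content/captured_octospine_fusion_analyzer.py | _find_phase_synergies
-- ===== SOURCE A (Python) =====
-- from typing import Dict, List, Set, Tuple, Any
--
-- def _find_phase_synergies(phase_mentions: Dict[str, int]) -> Dict[str, List[str]]:
--     """Find synergistic relationships between consciousness phases."""
--     phase_sequence = ['foundation', 'abundance', 'sanctuary', 'evolution']
--     synergies = {}
--
--     for i, phase in enumerate(phase_sequence):
--         if phase in phase_mentions:
--             adjacent_phases = []
--             if i > 0:
--                 adjacent_phases.append(phase_sequence[i-1])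
--             if i < len(phase_sequence) - 1:
--                 adjacent_phases.append(phase_sequence[i+1])
--             synergies[phase] = adjacent_phases
--
--     return synergies
-- ===== SOURCE B (Python) =====
-- _ADJACENT = {
--     'foundation': ['abundance'],
--     'abundance': ['foundation', 'sanctuary'],
--     'sanctuary': ['abundance', 'evolution'],
--     'evolution': ['sanctuary'],
-- }
--
-- def _find_phase_synergies(phase_mentions):
--     """Find synergistic relationships between consciousness phases."""
--     return {phase: list(neighbors)
--             for phase, neighbors in _ADJACENT.items()
--             if phase in phase_mentions}
-- ===== Notes on version B (the rewrite author's own statement) =====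
-- stated objective: simpler
-- what changed: Replaces the enumerate loop with index arithmetic and boundary if-branches by a fixed precomputed adjacency table filtered by key presence.
import Mathlib
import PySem

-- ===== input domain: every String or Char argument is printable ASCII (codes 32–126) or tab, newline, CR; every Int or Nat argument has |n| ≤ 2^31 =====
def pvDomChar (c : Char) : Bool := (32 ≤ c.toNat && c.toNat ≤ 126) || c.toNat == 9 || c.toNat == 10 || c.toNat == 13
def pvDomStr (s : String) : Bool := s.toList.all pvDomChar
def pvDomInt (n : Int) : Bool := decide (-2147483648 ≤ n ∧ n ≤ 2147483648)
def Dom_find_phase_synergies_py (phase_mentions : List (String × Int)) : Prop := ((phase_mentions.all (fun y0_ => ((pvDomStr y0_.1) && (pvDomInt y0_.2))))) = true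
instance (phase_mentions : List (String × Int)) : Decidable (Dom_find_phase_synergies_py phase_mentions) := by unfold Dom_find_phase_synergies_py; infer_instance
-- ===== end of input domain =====

-- B replaces A's enumerate loop with index arithmetic by a fixed adjacency table filtered by key presence (simpler).


-- ===== PORT A =====
-- 'phase in phase_mentions' (dict key membership) is ported as a key scan of the association list.
def find_phase_synergies_py (phase_mentions : List (String × Int)) : List (String × List String) :=
  let phase_sequence : List String := ["foundation", "abundance", "sanctuary", "evolution"]
  let synergies : PySem.Dict String (List String) :=
    (PySem.List.enumerate phase_sequence).foldl (fun synergies ip =>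
      let i := ip.1
      let phase := ip.2
      if phase_mentions.any (fun p => p.1 == phase) then
        let adjacent_phases : List String := []
        let adjacent_phases :=
          if i > 0 then adjacent_phases ++ [PySem.List.pyGetD phase_sequence ((i : Int) - 1) ""]
          else adjacent_phases
        let adjacent_phases :=
          if i < phase_sequence.length - 1 then adjacent_phases ++ [PySem.List.pyGetD phase_sequence ((i : Int) + 1) ""]
          else adjacent_phases
        synergies.insert phase adjacent_phases
      else synergies) PySem.Dict.empty
  synergies.items

-- ===== PORT B =====
def pvAdjacent : List (String × List String) :=
  [("foundation", ["abundance"]),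
   ("abundance", ["foundation", "sanctuary"]),
   ("sanctuary", ["abundance", "evolution"]),
   ("evolution", ["sanctuary"])]

def find_phase_synergies_py_alt (phase_mentions : List (String × Int)) : List (String × List String) :=
  (pvAdjacent.filter (fun pn => phase_mentions.any (fun p => p.1 == pn.1))).map
    (fun pn => (pn.1, pn.2.map id))

-- ===== PRECONDITION & SPEC =====
def Spec_find_phase_synergies_py (phase_mentions : List (String × Int)) (out : List (String × List String)) : Prop := out = find_phase_synergies_py_alt phase_mentions
instance (phase_mentions : List (String × Int)) (out : List (String × List String)) : Decidable (Spec_find_phase_synergies_py phase_mentions out) := by unfold Spec_find_phase_synergies_py; infer_instance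

-- ===== CLAIM (what is proved, stated in full; the proofs are below) =====
def Claim_equal_find_phase_synergies_py : Prop := ∀ (phase_mentions : List (String × Int)), Dom_find_phase_synergies_py phase_mentions → Spec_find_phase_synergies_py phase_mentions (find_phase_synergies_py phase_mentions)

-- ===== LEMMAS AND PROOFS =====

-- ===== VERDICT (by name: the statement is the Claim_ definition above) =====
theorem find_phase_synergies_py_spec : Claim_equal_find_phase_synergies_py := by
  intro pm _
  show find_phase_synergies_py pm = find_phase_synergies_py_alt pm
  by_cases hf : pm.any (fun p => p.1 == "foundation") = true <;>
  by_cases ha : pm.any (fun p => p.1 == "abundance") = true <;>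
  by_cases hs : pm.any (fun p => p.1 == "sanctuary") = true <;>
  by_cases he : pm.any (fun p => p.1 == "evolution") = true <;>
    simp [find_phase_synergies_py, find_phase_synergies_py_alt, pvAdjacent,
      PySem.List.enumerate, hf, ha, hs, he, PySem.List.pyGetD, PySem.List.pyGet?,
      PySem.List.pyIdx?, PySem.Dict.insert, PySem.Dict.items, PySem.Dict.empty]
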